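-- pv_equiv track=rewrite | github.com/jkrstulo/LF_dist | run_bfsw_sp_dense.py | bfs_edges
-- ===== SOURCE A (Python) =====
-- from collections import defaultdict, deque
--
-- def bfs_edges(G, start):
--     """
--     breadth first search of a dictionary-based graph
--     :param G: graph defined as a dictionary
--     :param start: start node
--     :return: ordered list of buses, ordered list of branches, list of edges which close the loops
--     """
--     edges_ordered_list = []
--     branches_loops = []
--     neighbors = G[start]
--     visited = set([start])
--     visited_branches = set()
--     queue = deque([(start, neighbors)])
--     bus_ordered_list = [start]
--     while queue:
--         parent, children = queue[0]
--         for child in children: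
--             if child not in visited:
--                 edges_ordered_list.append([parent, child])
--                 visited.add(child)
--                 visited_branches.add((parent, child))
--                 visited_branches.add((child, parent))
--                 neighbors = G[child]
--                 queue.append((child, neighbors))
--                 bus_ordered_list.append(child)
--             elif (parent, child) not in visited_branches:  # loop detected
--                 if parent > child:
--                     branches_loops.append((child, parent))
--                 else:
--                     branches_loops.append((parent, child))
--                 visited_branches.add((child, parent))
--                 visited_branches.add((parent, child))
--         queue.popleft()
--
--     return bus_ordered_list, edges_ordered_list, branches_loops
-- ===== SOURCE B (Python) =====
-- from collections import deque
--
-- def bfs_edges(G, start):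
--     """
--     Two-pass re-implementation: pass 1 is a plain BFS over nodes building the
--     bus order, tree edges and a set of tree edges (both directions); pass 2
--     scans the adjacency of the buses in BFS order and collects the non-tree
--     edges, first occurrence only, normalized as (min, max).
--     """
--     visited = {start}
--     bus_ordered_list = [start]
--     edges_ordered_list = []
--     tree_edges = set()
--     queue = deque([start])
--     while queue:
--         parent = queue.popleft()
--         for child in G[parent]:
--             if child not in visited:
--                 visited.add(child)
--                 bus_ordered_list.append(child)
--                 edges_ordered_list.append([parent, child])
--                 tree_edges.add((parent, child))
--                 tree_edges.add((child, parent))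
--                 queue.append(child)
--     branches_loops = []
--     seen = set()
--     for bus in bus_ordered_list:
--         for child in G[bus]:
--             if (bus, child) not in tree_edges and (bus, child) not in seen:
--                 branches_loops.append((min(bus, child), max(bus, child)))
--                 seen.add((bus, child))
--                 seen.add((child, bus))
--     return bus_ordered_list, edges_ordered_list, branches_loops
-- ===== Notes on version B (the rewrite author's own statement) =====
-- stated objective: alternative
-- what changed: A detects loop-closing edges inside the BFS itself through one shared visited_branches set; B splits the work into two differently shaped passes: a plain tree BFS building the bus order, tree edges and a tree-edge set, then a separate scan of the adjacency lists in bus order that collects first occurrences of non-tree edges normalized as (min, max).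
import Mathlib
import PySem

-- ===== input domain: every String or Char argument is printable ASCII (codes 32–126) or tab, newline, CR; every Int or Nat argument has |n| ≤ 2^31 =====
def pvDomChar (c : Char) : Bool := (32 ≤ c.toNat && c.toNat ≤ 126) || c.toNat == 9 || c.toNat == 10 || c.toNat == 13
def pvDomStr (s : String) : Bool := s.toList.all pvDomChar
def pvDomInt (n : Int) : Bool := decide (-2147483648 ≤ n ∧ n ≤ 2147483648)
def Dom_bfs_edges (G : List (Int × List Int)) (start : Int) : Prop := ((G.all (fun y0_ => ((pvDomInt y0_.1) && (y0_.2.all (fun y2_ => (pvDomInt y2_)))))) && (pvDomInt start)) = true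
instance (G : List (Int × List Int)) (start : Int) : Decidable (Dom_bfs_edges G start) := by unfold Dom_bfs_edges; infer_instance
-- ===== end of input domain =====

-- B replaces A's fused BFS (tree discovery and loop-edge detection interleaved through one
-- visited_branches set) by two separate passes: a plain tree BFS, then a scan of the adjacency
-- lists in bus order collecting the non-tree edges (objective: alternative decomposition).

-- shared helper: the Python dict access G[x] (both Pythons read G the same way); total via a
-- [] default — the inputs where Python raises KeyError are excluded by Pre_bfs_edges below
def pyAdj (G : List (Int × List Int)) (x : Int) : List Int :=
  PySem.Dict.getD (PySem.Dict.mk G) x []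

-- shared fuel bound for both while-loops: 2 + total adjacency size, provably
-- sufficient (lemmas g_suff / sM_init below show the queue is empty at this fuel)
def pvFuel (G : List (Int × List Int)) : Nat :=
  2 + (G.map (fun p => p.2.length)).sum

-- ===== PORT A =====
-- loop state: (edges_ordered_list, branches_loops, visited, visited_branches, queue, bus_ordered_list)
structure BfsStA where
  edges : List (List Int)
  loops : List (Int × Int)
  vis : PySem.Set Int
  vb : PySem.Set (Int × Int)
  queue : List (Int × List Int)
  buses : List Int
def bfsA_children (G : List (Int × List Int)) (parent : Int) : List Int → BfsStA → BfsStA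
  | [], st => st
  | child :: cs, st =>
    if child ∉ st.vis then
      bfsA_children G parent cs
        ⟨st.edges ++ [[parent, child]], st.loops, PySem.Set.add st.vis child,
         PySem.Set.add (PySem.Set.add st.vb (parent, child)) (child, parent),
         st.queue ++ [(child, pyAdj G child)], st.buses ++ [child]⟩
    else if (parent, child) ∉ st.vb then  -- loop detected
      bfsA_children G parent cs
        ⟨st.edges, st.loops ++ [if parent > child then (child, parent) else (parent, child)],
         st.vis, PySem.Set.add (PySem.Set.add st.vb (child, parent)) (parent, child),
         st.queue, st.buses⟩
    else
      bfsA_children G parent cs st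
def bfsA_loop (G : List (Int × List Int)) : Nat → BfsStA → BfsStA
  | 0, st => st
  | fuel + 1, st =>
    match st.queue with
    | [] => st
    | (parent, children) :: _ =>
      bfsA_loop G fuel
        (let st' := bfsA_children G parent children st
         ⟨st'.edges, st'.loops, st'.vis, st'.vb, st'.queue.tail, st'.buses⟩)
def bfs_edges (G : List (Int × List Int)) (start : Int) : List Int × List (List Int) × (List (Int × Int)) :=
  let neighbors := pyAdj G start
  let st := bfsA_loop G (pvFuel G)
    ⟨[], [], PySem.Set.add PySem.Set.empty start, PySem.Set.empty, [(start, neighbors)], [start]⟩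
  (st.buses, st.edges, st.loops)
-- ===== PORT B =====
-- pass-1 state: (visited, bus_ordered_list, edges_ordered_list, tree_edges, queue)
structure BfsStB where
  vis : PySem.Set Int
  buses : List Int
  edges : List (List Int)
  tree : PySem.Set (Int × Int)
  queue : List Int
def bfsB_children (parent : Int) : List Int → BfsStB → BfsStB
  | [], st => st
  | c :: cs, st =>
    if c ∉ st.vis then
      bfsB_children parent cs
        ⟨PySem.Set.add st.vis c, st.buses ++ [c], st.edges ++ [[parent, c]],
         PySem.Set.add (PySem.Set.add st.tree (parent, c)) (c, parent), st.queue ++ [c]⟩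
    else
      bfsB_children parent cs st
def bfsB_loop (G : List (Int × List Int)) : Nat → BfsStB → BfsStB
  | 0, st => st
  | fuel + 1, st =>
    match st.queue with
    | [] => st
    | parent :: rest =>
      bfsB_loop G fuel
        (bfsB_children parent (pyAdj G parent) ⟨st.vis, st.buses, st.edges, st.tree, rest⟩)
def bfsB_pass2_bus (T : PySem.Set (Int × Int)) (bus : Int) :
    List Int → PySem.Set (Int × Int) × List (Int × Int) → PySem.Set (Int × Int) × List (Int × Int)
  | [], acc => acc
  | c :: cs, (seen, out) =>
    if (bus, c) ∉ T ∧ (bus, c) ∉ seen then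
      bfsB_pass2_bus T bus cs
        (PySem.Set.add (PySem.Set.add seen (bus, c)) (c, bus), out ++ [(min bus c, max bus c)])
    else
      bfsB_pass2_bus T bus cs (seen, out)
def bfsB_pass2 (G : List (Int × List Int)) (T : PySem.Set (Int × Int)) :
    List Int → PySem.Set (Int × Int) × List (Int × Int) → List (Int × Int)
  | [], acc => acc.2
  | b :: bs, acc => bfsB_pass2 G T bs (bfsB_pass2_bus T b (pyAdj G b) acc)
def bfs_edges_alt (G : List (Int × List Int)) (start : Int) : List Int × List (List Int) × (List (Int × Int)) :=
  let st := bfsB_loop G (pvFuel G)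
    ⟨PySem.Set.add PySem.Set.empty start, [start], [], PySem.Set.empty, [start]⟩
  (st.buses, st.edges, bfsB_pass2 G st.tree st.buses (PySem.Set.empty, []))
-- ===== PRECONDITION & SPEC =====
-- the set of nodes the BFS can reach from start following adjacency lists of present keys
-- (the standard reachable set, computed as an iterated closure; G.length + 1 rounds suffice
-- because a shortest path repeats no key)
def pvReach (G : List (Int × List Int)) (start : Int) : List Int :=
  (fun S => PySem.Set.ofList (S ++ S.flatMap (pyAdj G)))^[G.length + 1] [start]

-- Pre_ excludes exactly the inputs where the Python A raises KeyError: A looks up G[c] for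
-- every node c it reaches (including start), so it returns normally iff every reachable node
-- has an entry in G.
def Pre_bfs_edges (G : List (Int × List Int)) (start : Int) : Prop :=
  ∀ c ∈ pvReach G start, PySem.Dict.get? (PySem.Dict.mk G) c ≠ none

instance (G : List (Int × List Int)) (start : Int) : Decidable (Pre_bfs_edges G start) := by
  unfold Pre_bfs_edges; infer_instance

def pvWitness_bfs_edges : (List (Int × List Int)) × Int :=
  ([(0, [1, 2]), (1, [0, 2]), (2, [0, 1, 2])], 0)

def Spec_bfs_edges (G : List (Int × List Int)) (start : Int) (out : List Int × List (List Int) × (List (Int × Int))) : Prop := out = bfs_edges_alt G start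
instance (G : List (Int × List Int)) (start : Int) (out : List Int × List (List Int) × (List (Int × Int))) : Decidable (Spec_bfs_edges G start out) := by unfold Spec_bfs_edges; infer_instance

-- ===== CLAIM (what is proved, stated in full; the proofs are below) =====
def Claim_equal_bfs_edges : Prop := ∀ (G : List (Int × List Int)) (start : Int), Dom_bfs_edges G start → Pre_bfs_edges G start → Spec_bfs_edges G start (bfs_edges G start)

-- ===== LEMMAS AND PROOFS =====
-- ghost run used only by the proofs: a single BFS carrying BOTH programs' bookkeeping
-- (tb = tree edges both directions, lb = loop edges both directions, loops as A emits them)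
structure GS where
  buses : List Int
  edges : List (List Int)
  loops : List (Int × Int)
  vis : PySem.Set Int
  tb : PySem.Set (Int × Int)
  lb : PySem.Set (Int × Int)
  queue : List Int

-- tree-discovery step and loop-edge step of the ghost BFS
def gT (G : List (Int × List Int)) (p c : Int) (st : GS) : GS :=
  ⟨st.buses ++ [c], st.edges ++ [[p, c]], st.loops, PySem.Set.add st.vis c,
   PySem.Set.add (PySem.Set.add st.tb (p, c)) (c, p), st.lb, st.queue ++ [c]⟩
def gL (p c : Int) (st : GS) : GS :=
  ⟨st.buses, st.edges, st.loops ++ [if p > c then (c, p) else (p, c)], st.vis,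
   st.tb, PySem.Set.add (PySem.Set.add st.lb (p, c)) (c, p), st.queue⟩
def gPop (st : GS) (rest : List Int) : GS :=
  ⟨st.buses, st.edges, st.loops, st.vis, st.tb, st.lb, rest⟩
@[simp] theorem gT_buses (G : List (Int × List Int)) (p c : Int) (st : GS) : (gT G p c st).buses = st.buses ++ [c] := rfl
@[simp] theorem gT_edges (G : List (Int × List Int)) (p c : Int) (st : GS) : (gT G p c st).edges = st.edges ++ [[p, c]] := rfl
@[simp] theorem gT_loops (G : List (Int × List Int)) (p c : Int) (st : GS) : (gT G p c st).loops = st.loops := rfl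
@[simp] theorem gT_vis (G : List (Int × List Int)) (p c : Int) (st : GS) : (gT G p c st).vis = PySem.Set.add st.vis c := rfl
@[simp] theorem gT_tb (G : List (Int × List Int)) (p c : Int) (st : GS) : (gT G p c st).tb = PySem.Set.add (PySem.Set.add st.tb (p, c)) (c, p) := rfl
@[simp] theorem gT_lb (G : List (Int × List Int)) (p c : Int) (st : GS) : (gT G p c st).lb = st.lb := rfl
@[simp] theorem gT_queue (G : List (Int × List Int)) (p c : Int) (st : GS) : (gT G p c st).queue = st.queue ++ [c] := rfl
@[simp] theorem gL_buses (p c : Int) (st : GS) : (gL p c st).buses = st.buses := rfl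
@[simp] theorem gL_edges (p c : Int) (st : GS) : (gL p c st).edges = st.edges := rfl
@[simp] theorem gL_loops (p c : Int) (st : GS) : (gL p c st).loops = st.loops ++ [if p > c then (c, p) else (p, c)] := rfl
@[simp] theorem gL_vis (p c : Int) (st : GS) : (gL p c st).vis = st.vis := rfl
@[simp] theorem gL_tb (p c : Int) (st : GS) : (gL p c st).tb = st.tb := rfl
@[simp] theorem gL_lb (p c : Int) (st : GS) : (gL p c st).lb = PySem.Set.add (PySem.Set.add st.lb (p, c)) (c, p) := rfl
@[simp] theorem gL_queue (p c : Int) (st : GS) : (gL p c st).queue = st.queue := rfl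
@[simp] theorem gPop_buses (st : GS) (r : List Int) : (gPop st r).buses = st.buses := rfl
@[simp] theorem gPop_edges (st : GS) (r : List Int) : (gPop st r).edges = st.edges := rfl
@[simp] theorem gPop_loops (st : GS) (r : List Int) : (gPop st r).loops = st.loops := rfl
@[simp] theorem gPop_vis (st : GS) (r : List Int) : (gPop st r).vis = st.vis := rfl
@[simp] theorem gPop_tb (st : GS) (r : List Int) : (gPop st r).tb = st.tb := rfl
@[simp] theorem gPop_lb (st : GS) (r : List Int) : (gPop st r).lb = st.lb := rfl
@[simp] theorem gPop_queue (st : GS) (r : List Int) : (gPop st r).queue = r := rfl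
def gChild (G : List (Int × List Int)) (p : Int) : List Int → GS → GS
  | [], st => st
  | c :: cs, st =>
    if c ∉ st.vis then gChild G p cs (gT G p c st)
    else if (p, c) ∉ st.tb ∧ (p, c) ∉ st.lb then gChild G p cs (gL p c st)
    else gChild G p cs st
def gLoop (G : List (Int × List Int)) : Nat → GS → GS
  | 0, st => st
  | fuel + 1, st =>
    match st.queue with
    | [] => st
    | p :: rest => gLoop G fuel (gChild G p (pyAdj G p) (gPop st rest))
theorem g_vis_mono (G : List (Int × List Int)) (p : Int) (cs : List Int) (st : GS) :
    ∀ x ∈ st.vis, x ∈ (gChild G p cs st).vis := by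
  induction cs generalizing st with
  | nil => simp [gChild]
  | cons c cs ih =>
    intro x hx
    simp only [gChild]
    split_ifs with h1 h2
    · exact ih (gL p c st) x hx
    · exact ih st x hx
    · exact ih (gT G p c st) x (by simp only [gT_vis, PySem.Set.mem_add]; exact Or.inl hx)
theorem g_tb_mono (G : List (Int × List Int)) (p : Int) (cs : List Int) (st : GS) :
    ∀ e ∈ st.tb, e ∈ (gChild G p cs st).tb := by
  induction cs generalizing st with
  | nil => simp [gChild]
  | cons c cs ih =>
    intro e he
    simp only [gChild]
    split_ifs with h1 h2
    · exact ih (gL p c st) e he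
    · exact ih st e he
    · exact ih (gT G p c st) e (by simp only [gT_tb, PySem.Set.mem_add]; exact Or.inl (Or.inl he))
theorem g_key_child (G : List (Int × List Int)) (p : Int) (cs : List Int) (st : GS) :
    ∀ e ∈ (gChild G p cs st).tb, e ∈ st.tb ∨ e.1 ∉ st.vis ∨ e.2 ∉ st.vis := by
  induction cs generalizing st with
  | nil => exact fun e he => Or.inl he
  | cons c cs ih =>
    intro e he
    simp only [gChild] at he
    split_ifs at he with h1 h2
    · rcases ih (gL p c st) e he with h | h | h
      · exact Or.inl h
      · exact Or.inr (Or.inl h)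
      · exact Or.inr (Or.inr h)
    · exact ih st e he
    · rcases ih (gT G p c st) e he with h | h | h
      · simp only [gT_tb, PySem.Set.mem_add] at h
        rcases h with (h | h) | h
        · exact Or.inl h
        · subst h; exact Or.inr (Or.inr h1)
        · subst h; exact Or.inr (Or.inl h1)
      · simp only [gT_vis, PySem.Set.mem_add] at h
        exact Or.inr (Or.inl (fun hc => h (Or.inl hc)))
      · simp only [gT_vis, PySem.Set.mem_add] at h
        exact Or.inr (Or.inr (fun hc => h (Or.inl hc)))
theorem g_app (G : List (Int × List Int)) (p : Int) (cs : List Int) (st : GS) :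
    ∃ D, (gChild G p cs st).queue = st.queue ++ D ∧ (gChild G p cs st).buses = st.buses ++ D ∧
      ∀ x ∈ D, x ∈ (gChild G p cs st).vis := by
  induction cs generalizing st with
  | nil => exact ⟨[], by simp [gChild]⟩
  | cons c cs ih =>
    simp only [gChild]
    split_ifs with h1 h2
    · exact ih (gL p c st)
    · exact ih st
    · obtain ⟨D, hq, hb, hv⟩ := ih (gT G p c st)
      refine ⟨c :: D, ?_, ?_, ?_⟩
      · rw [hq]; simp
      · rw [hb]; simp
      · intro x hx
        rcases List.mem_cons.mp hx with rfl | hx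
        · exact g_vis_mono _ _ _ _ x (by simp [gT_vis, PySem.Set.mem_add])
        · exact hv x hx

theorem gl_tb_mono (G : List (Int × List Int)) (f : Nat) (st : GS) :
    ∀ e ∈ st.tb, e ∈ (gLoop G f st).tb := by
  induction f generalizing st with
  | zero => simp [gLoop]
  | succ f ih =>
    intro e he
    rw [gLoop]
    match hq : st.queue with
    | [] => exact he
    | p :: rest => exact ih _ e (g_tb_mono _ _ _ _ e he)
theorem g_key_loop (G : List (Int × List Int)) (f : Nat) (st : GS) :
    ∀ e ∈ (gLoop G f st).tb, e ∈ st.tb ∨ e.1 ∉ st.vis ∨ e.2 ∉ st.vis := by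
  induction f generalizing st with
  | zero => exact fun e he => Or.inl he
  | succ f ih =>
    intro e he
    rw [gLoop] at he
    match hq : st.queue with
    | [] => rw [hq] at he; exact Or.inl he
    | p :: rest =>
      rw [hq] at he
      rcases ih _ e he with h | h | h
      · rcases g_key_child _ _ _ _ e h with h' | h' | h'
        · exact Or.inl h'
        · exact Or.inr (Or.inl h')
        · exact Or.inr (Or.inr h')
      · exact Or.inr (Or.inl (fun hc => h (g_vis_mono _ _ _ _ _ hc)))
      · exact Or.inr (Or.inr (fun hc => h (g_vis_mono _ _ _ _ _ hc)))
theorem gl_buses_ext (G : List (Int × List Int)) (f : Nat) (st : GS) :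
    ∃ E, (gLoop G f st).buses = st.buses ++ E := by
  induction f generalizing st with
  | zero => exact ⟨[], by simp [gLoop]⟩
  | succ f ih =>
    rw [gLoop]
    match hq : st.queue with
    | [] => exact ⟨[], by simp⟩
    | p :: rest =>
      obtain ⟨E, hE⟩ := ih (gChild G p (pyAdj G p) (gPop st rest))
      obtain ⟨D, _, hD, _⟩ := g_app G p (pyAdj G p) (gPop st rest)
      exact ⟨D ++ E, by rw [hE, hD]; simp⟩
def adjU (G : List (Int × List Int)) : List Int := G.flatMap (·.2)
theorem pyAdj_sub (G : List (Int × List Int)) (x : Int) : ∀ c ∈ pyAdj G x, c ∈ adjU G := by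
  intro c hc
  unfold pyAdj at hc
  induction G with
  | nil => simp [PySem.Dict.getD, PySem.Dict.get?] at hc
  | cons h t ih =>
    rw [PySem.Dict.getD_eq_get?_getD] at hc ih
    obtain ⟨k, v⟩ := h
    rw [PySem.Dict.get?_mk_cons] at hc
    by_cases hk : (k == x)
    · simp [hk] at hc
      simp only [adjU, List.flatMap_cons, List.mem_append]
      exact Or.inl hc
    · simp only [hk, Bool.false_eq_true, if_false] at hc
      have := ih hc
      simp [adjU] at this ⊢
      tauto
def sM (U : List Int) (st : GS) : Nat :=
  (U.toFinset \ st.vis.toFinset).card + st.queue.length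
theorem g_sM (G : List (Int × List Int)) (p : Int) (cs : List Int) (st : GS) (U : List Int)
    (hU : ∀ x ∈ cs, x ∈ U) : sM U (gChild G p cs st) = sM U st := by
  induction cs generalizing st with
  | nil => simp [gChild]
  | cons c cs ih =>
    simp only [gChild]
    split_ifs with h1 h2
    · rw [ih (gL p c st) (fun x hx => hU x (by simp [hx]))]
      simp [sM, gL]
    · exact ih st (fun x hx => hU x (by simp [hx]))
    · rw [ih (gT G p c st) (fun x hx => hU x (by simp [hx]))]
      have hc : c ∈ U.toFinset \ st.vis.toFinset := by
        rw [Finset.mem_sdiff, List.mem_toFinset, List.mem_toFinset]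
        exact ⟨hU c (by simp), h1⟩
      have hpos : 0 < (U.toFinset \ st.vis.toFinset).card := Finset.card_pos.mpr ⟨c, hc⟩
      have hvis : (gT G p c st).vis = st.vis ++ [c] := by
        simp only [gT_vis, PySem.Set.add, PySem.Set.contains]
        simp [h1]
      unfold sM
      rw [hvis]
      have : (U.toFinset \ (st.vis ++ [c]).toFinset) = (U.toFinset \ st.vis.toFinset).erase c := by
        rw [List.toFinset_append]
        simp only [List.toFinset_cons, List.toFinset_nil, insert_empty_eq]
        rw [Finset.union_singleton, Finset.sdiff_insert]
      rw [this, Finset.card_erase_of_mem hc]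
      simp only [gT_queue, List.length_append, List.length_singleton]
      omega
theorem g_suff (G : List (Int × List Int)) (f : Nat) (st : GS)
    (h : sM (adjU G) st ≤ f) : (gLoop G f st).queue = [] := by
  induction f generalizing st with
  | zero =>
    have : st.queue.length = 0 := by unfold sM at h; omega
    rw [gLoop]
    exact List.length_eq_zero_iff.mp this
  | succ f ih =>
    rw [gLoop]
    match hq : st.queue with
    | [] => exact hq
    | p :: rest =>
      apply ih
      rw [g_sM G p (pyAdj G p) (gPop st rest) (adjU G) (pyAdj_sub G p)]
      unfold sM at h ⊢
      simp only [gPop_vis, gPop_queue]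
      rw [hq] at h
      simp at h
      omega
theorem minmax_eq (p c : Int) : (min p c, max p c) = if p > c then (c, p) else (p, c) := by
  split_ifs with h <;> rw [Prod.mk.injEq] <;> constructor <;> omega
theorem Linner (G : List (Int × List Int)) (p : Int) (cs : List Int) (st : GS) (f : Nat)
    (hp : p ∈ st.vis) :
    bfsB_pass2_bus ((gLoop G f (gChild G p cs st)).tb) p cs (st.lb, st.loops)
      = ((gChild G p cs st).lb, (gChild G p cs st).loops) := by
  induction cs generalizing st with
  | nil => simp [bfsB_pass2_bus, gChild]
  | cons c cs ih =>
    simp only [gChild]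
    split_ifs with h1 h2
    · -- loop edge branch
      have hnotT : (p, c) ∉ (gLoop G f (gChild G p cs (gL p c st))).tb := by
        intro hT
        rcases g_key_loop _ _ _ _ hT with h | h | h
        · rcases g_key_child _ _ _ _ _ h with h' | h' | h'
          · exact h2.1 (by simpa using h')
          · exact h' (by simpa using hp)
          · exact h' (by simpa using h1)
        · exact h (g_vis_mono _ _ _ _ _ (by simpa using hp))
        · exact h (g_vis_mono _ _ _ _ _ (by simpa using h1))
      rw [bfsB_pass2_bus, if_pos ⟨hnotT, h2.2⟩]
      have : (PySem.Set.add (PySem.Set.add st.lb (p, c)) (c, p),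
              st.loops ++ [(min p c, max p c)]) = ((gL p c st).lb, (gL p c st).loops) := by
        rw [gL_lb, gL_loops, minmax_eq]
      rw [this]
      exact ih (gL p c st) (by simpa using hp)
    · -- already-seen branch
      push_neg at h2
      have hcond : ¬ ((p, c) ∉ (gLoop G f (gChild G p cs st)).tb ∧ (p, c) ∉ st.lb) := by
        by_cases htb : (p, c) ∈ st.tb
        · intro hx
          exact hx.1 (gl_tb_mono _ _ _ _ (g_tb_mono _ _ _ _ _ htb))
        · intro hx
          exact hx.2 (h2 htb)
      rw [bfsB_pass2_bus, if_neg hcond]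
      exact ih st hp
    · -- tree branch
      have hT : (p, c) ∈ (gLoop G f (gChild G p cs (gT G p c st))).tb := by
        apply gl_tb_mono
        apply g_tb_mono
        simp [gT_tb, PySem.Set.mem_add]
      rw [bfsB_pass2_bus, if_neg (by intro hx; exact hx.1 hT)]
      have : (st.lb, st.loops) = ((gT G p c st).lb, (gT G p c st).loops) := rfl
      rw [this]
      exact ih (gT G p c st) (by simp only [gT_vis, PySem.Set.mem_add]; exact Or.inl hp)
theorem Louter (G : List (Int × List Int)) (f : Nat) (st : GS)
    (hqv : ∀ n ∈ st.queue, n ∈ st.vis)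
    (hend : (gLoop G f st).queue = []) :
    bfsB_pass2 G ((gLoop G f st).tb)
      (st.queue ++ ((gLoop G f st).buses.drop st.buses.length)) (st.lb, st.loops)
      = (gLoop G f st).loops := by
  induction f generalizing st with
  | zero =>
    rw [gLoop] at hend ⊢
    rw [hend, List.drop_length]
    simp [bfsB_pass2]
  | succ f ih =>
    cases hq : st.queue with
    | nil =>
      simp only [gLoop, hq] at hend ⊢
      rw [List.drop_length]
      simp [bfsB_pass2]
    | cons p rest =>
      simp only [gLoop, hq] at hend ⊢
      have hp : p ∈ (gPop st rest).vis := hqv p (by rw [hq]; exact List.mem_cons_self)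
      obtain ⟨D, hDq, hDb, hDv⟩ := g_app G p (pyAdj G p) (gPop st rest)
      obtain ⟨E, hE⟩ := gl_buses_ext G f (gChild G p (pyAdj G p) (gPop st rest))
      have hlin := Linner G p (pyAdj G p) (gPop st rest) f hp
      simp only [gPop_lb, gPop_loops] at hlin
      rw [List.cons_append, bfsB_pass2, hlin]
      have hstream :
          rest ++ ((gLoop G f (gChild G p (pyAdj G p) (gPop st rest))).buses.drop st.buses.length)
            = (gChild G p (pyAdj G p) (gPop st rest)).queue ++
              ((gLoop G f (gChild G p (pyAdj G p) (gPop st rest))).buses.drop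
                (gChild G p (pyAdj G p) (gPop st rest)).buses.length) := by
        rw [hDq, hDb, hE, hDb]
        simp only [gPop_queue, gPop_buses]
        rw [List.append_assoc, List.drop_left, ← List.append_assoc st.buses D E, List.drop_left]
        simp [List.append_assoc]
      rw [hstream]
      apply ih
      · intro n hn
        rw [hDq] at hn
        simp only [gPop_queue, List.mem_append] at hn
        rcases hn with hn | hn
        · exact g_vis_mono _ _ _ _ n (hqv n (by rw [hq]; exact List.mem_cons_of_mem _ hn))
        · exact hDv n hn
      · exact hend
theorem coupA_child (G : List (Int × List Int)) (p : Int) (cs : List Int) :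
    ∀ (sa : BfsStA) (sg : GS) (q0 : List (Int × List Int)),
    sa.edges = sg.edges → sa.loops = sg.loops → sa.vis = sg.vis → sa.buses = sg.buses →
    (∀ e : Int × Int, e ∈ sa.vb ↔ (e ∈ sg.tb ∨ e ∈ sg.lb)) →
    sa.queue = q0 ++ sg.queue.map (fun n => (n, pyAdj G n)) →
    (bfsA_children G p cs sa).edges = (gChild G p cs sg).edges ∧
    (bfsA_children G p cs sa).loops = (gChild G p cs sg).loops ∧
    (bfsA_children G p cs sa).vis = (gChild G p cs sg).vis ∧
    (bfsA_children G p cs sa).buses = (gChild G p cs sg).buses ∧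
    (∀ e : Int × Int, e ∈ (bfsA_children G p cs sa).vb ↔
      (e ∈ (gChild G p cs sg).tb ∨ e ∈ (gChild G p cs sg).lb)) ∧
    (bfsA_children G p cs sa).queue = q0 ++ (gChild G p cs sg).queue.map (fun n => (n, pyAdj G n)) := by
  induction cs with
  | nil =>
    intro sa sg q0 h1 h2 h3 h4 h5 h6
    exact ⟨h1, h2, h3, h4, h5, h6⟩
  | cons c cs ih =>
    intro sa sg q0 h1 h2 h3 h4 h5 h6
    simp only [bfsA_children, gChild]
    by_cases hc : c ∈ sg.vis
    · by_cases hpc : (p, c) ∈ sg.tb ∨ (p, c) ∈ sg.lb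
      · -- skip branch on both sides
        rw [if_neg (show ¬ c ∉ sa.vis by rw [h3]; simp [hc]),
            if_neg (show ¬ (p, c) ∉ sa.vb by simp; exact (h5 (p, c)).mpr hpc),
            if_neg (show ¬ c ∉ sg.vis by simp [hc]),
            if_neg (show ¬ ((p, c) ∉ sg.tb ∧ (p, c) ∉ sg.lb) by rw [not_and_or]; tauto)]
        exact ih sa sg q0 h1 h2 h3 h4 h5 h6
      · -- loop branch on both sides
        rw [if_neg (show ¬ c ∉ sa.vis by rw [h3]; simp [hc]),
            if_pos (show (p, c) ∉ sa.vb by rw [h5]; exact hpc),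
            if_neg (show ¬ c ∉ sg.vis by simp [hc]),
            if_pos (show (p, c) ∉ sg.tb ∧ (p, c) ∉ sg.lb by rw [not_or] at hpc; exact hpc)]
        refine ih _ _ q0 ?_ ?_ ?_ ?_ ?_ ?_
        · exact h1
        · simp only [gL_loops]; rw [h2]
        · exact h3
        · exact h4
        · intro e
          simp only [PySem.Set.mem_add, gL_lb, gL_tb]
          rw [h5 e]
          tauto
        · exact h6
    · -- tree branch on both sides
      rw [if_pos (show c ∉ sa.vis by rw [h3]; exact hc), if_pos hc]
      refine ih _ _ q0 ?_ ?_ ?_ ?_ ?_ ?_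
      · simp only [gT_edges]; rw [h1]
      · exact h2
      · simp only [gT_vis]; rw [h3]
      · simp only [gT_buses]; rw [h4]
      · intro e
        simp only [PySem.Set.mem_add, gT_tb, gT_lb]
        rw [h5 e]
        tauto
      · simp only [gT_queue, List.map_append, List.map_cons, List.map_nil]
        rw [h6, List.append_assoc]
theorem coupA_loop (G : List (Int × List Int)) :
    ∀ (f : Nat) (sa : BfsStA) (sg : GS),
    sa.edges = sg.edges → sa.loops = sg.loops → sa.vis = sg.vis → sa.buses = sg.buses →
    (∀ e : Int × Int, e ∈ sa.vb ↔ (e ∈ sg.tb ∨ e ∈ sg.lb)) →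
    sa.queue = sg.queue.map (fun n => (n, pyAdj G n)) →
    (bfsA_loop G f sa).buses = (gLoop G f sg).buses ∧
    (bfsA_loop G f sa).edges = (gLoop G f sg).edges ∧
    (bfsA_loop G f sa).loops = (gLoop G f sg).loops := by
  intro f
  induction f with
  | zero =>
    intro sa sg h1 h2 h3 h4 h5 h6
    exact ⟨h4, h1, h2⟩
  | succ f ih =>
    intro sa sg h1 h2 h3 h4 h5 h6
    cases hgq : sg.queue with
    | nil =>
      have hsq : sa.queue = [] := by rw [h6, hgq]; rfl
      simp only [bfsA_loop, gLoop, hgq, hsq]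
      exact ⟨h4, h1, h2⟩
    | cons n rest =>
      have hsq : sa.queue = (n, pyAdj G n) :: rest.map (fun n => (n, pyAdj G n)) := by
        rw [h6, hgq]; rfl
      simp only [bfsA_loop, gLoop, hgq, hsq]
      obtain ⟨c1, c2, c3, c4, c5, c6⟩ :=
        coupA_child G n (pyAdj G n) sa (gPop sg rest) [(n, pyAdj G n)] h1 h2 h3 h4 h5
          (by rw [hsq]; rfl)
      refine ih _ _ c1 c2 c3 c4 c5 ?_
      rw [c6]
      rfl
theorem coupB_child (G : List (Int × List Int)) (p : Int) (cs : List Int) :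
    ∀ (sb : BfsStB) (sg : GS),
    sb.vis = sg.vis → sb.buses = sg.buses → sb.edges = sg.edges → sb.tree = sg.tb →
    sb.queue = sg.queue →
    (bfsB_children p cs sb).vis = (gChild G p cs sg).vis ∧
    (bfsB_children p cs sb).buses = (gChild G p cs sg).buses ∧
    (bfsB_children p cs sb).edges = (gChild G p cs sg).edges ∧
    (bfsB_children p cs sb).tree = (gChild G p cs sg).tb ∧
    (bfsB_children p cs sb).queue = (gChild G p cs sg).queue := by
  induction cs with
  | nil =>
    intro sb sg h1 h2 h3 h4 h5
    exact ⟨h1, h2, h3, h4, h5⟩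
  | cons c cs ih =>
    intro sb sg h1 h2 h3 h4 h5
    simp only [bfsB_children, gChild]
    by_cases hc : c ∈ sg.vis
    · rw [if_neg (show ¬ c ∉ sb.vis by rw [h1]; simp [hc]),
          if_neg (show ¬ c ∉ sg.vis by simp [hc])]
      by_cases hpc : (p, c) ∉ sg.tb ∧ (p, c) ∉ sg.lb
      · rw [if_pos hpc]
        exact ih sb (gL p c sg) h1 h2 h3 h4 h5
      · rw [if_neg hpc]
        exact ih sb sg h1 h2 h3 h4 h5
    · rw [if_pos (show c ∉ sb.vis by rw [h1]; exact hc), if_pos hc]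
      refine ih _ _ ?_ ?_ ?_ ?_ ?_
      · simp only [gT_vis]; rw [h1]
      · simp only [gT_buses]; rw [h2]
      · simp only [gT_edges]; rw [h3]
      · simp only [gT_tb]; rw [h4]
      · simp only [gT_queue]; rw [h5]
theorem coupB_loop (G : List (Int × List Int)) :
    ∀ (f : Nat) (sb : BfsStB) (sg : GS),
    sb.vis = sg.vis → sb.buses = sg.buses → sb.edges = sg.edges → sb.tree = sg.tb →
    sb.queue = sg.queue →
    (bfsB_loop G f sb).buses = (gLoop G f sg).buses ∧
    (bfsB_loop G f sb).edges = (gLoop G f sg).edges ∧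
    (bfsB_loop G f sb).tree = (gLoop G f sg).tb := by
  intro f
  induction f with
  | zero =>
    intro sb sg h1 h2 h3 h4 h5
    exact ⟨h2, h3, h4⟩
  | succ f ih =>
    intro sb sg h1 h2 h3 h4 h5
    cases hgq : sg.queue with
    | nil =>
      have hsq : sb.queue = [] := by rw [h5, hgq]
      simp only [bfsB_loop, gLoop, hgq, hsq]
      exact ⟨h2, h3, h4⟩
    | cons n rest =>
      have hsq : sb.queue = n :: rest := by rw [h5, hgq]
      simp only [bfsB_loop, gLoop, hgq, hsq]
      obtain ⟨c1, c2, c3, c4, c5⟩ :=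
        coupB_child G n (pyAdj G n) ⟨sb.vis, sb.buses, sb.edges, sb.tree, rest⟩ (gPop sg rest)
          h1 h2 h3 h4 rfl
      exact ih _ _ c1 c2 c3 c4 c5
theorem sM_init (G : List (Int × List Int)) (start : Int) :
    sM (adjU G) ⟨[start], [], [], PySem.Set.add PySem.Set.empty start,
      PySem.Set.empty, PySem.Set.empty, [start]⟩ ≤ pvFuel G := by
  have h1 : ((adjU G).toFinset \ (PySem.Set.add PySem.Set.empty start).toFinset).card
      ≤ (adjU G).toFinset.card := Finset.card_le_card (Finset.sdiff_subset)
  have h2 : (adjU G).toFinset.card ≤ (adjU G).length := List.toFinset_card_le _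
  have h3 : (adjU G).length = (G.map (fun p => p.2.length)).sum := by
    unfold adjU
    rw [List.length_flatMap]
  unfold sM pvFuel
  simp only [List.length_cons, List.length_nil]
  omega
theorem AB_eq (G : List (Int × List Int)) (start : Int) :
    bfs_edges G start = bfs_edges_alt G start := by
  have hA := coupA_loop G (pvFuel G)
    ⟨[], [], PySem.Set.add PySem.Set.empty start, PySem.Set.empty,
      [(start, pyAdj G start)], [start]⟩
    ⟨[start], [], [], PySem.Set.add PySem.Set.empty start, PySem.Set.empty,
      PySem.Set.empty, [start]⟩
    rfl rfl rfl rfl (by intro e; simp [PySem.Set.empty]) (by simp)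
  have hB := coupB_loop G (pvFuel G)
    ⟨PySem.Set.add PySem.Set.empty start, [start], [], PySem.Set.empty, [start]⟩
    ⟨[start], [], [], PySem.Set.add PySem.Set.empty start, PySem.Set.empty,
      PySem.Set.empty, [start]⟩
    rfl rfl rfl rfl rfl
  set g0 : GS := ⟨[start], [], [], PySem.Set.add PySem.Set.empty start,
    PySem.Set.empty, PySem.Set.empty, [start]⟩ with hg0
  have hend : (gLoop G (pvFuel G) g0).queue = [] := g_suff G (pvFuel G) g0 (sM_init G start)
  have hqv : ∀ n ∈ g0.queue, n ∈ g0.vis := by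
    intro n hn
    simp only [hg0] at hn ⊢
    simp at hn
    simp [hn]
  have hL := Louter G (pvFuel G) g0 hqv hend
  obtain ⟨E, hE⟩ := gl_buses_ext G (pvFuel G) g0
  have hstream : g0.queue ++ ((gLoop G (pvFuel G) g0).buses.drop g0.buses.length)
      = (gLoop G (pvFuel G) g0).buses := by
    rw [hE]
    simp only [hg0]
    rw [List.drop_left]
  rw [hstream] at hL
  show (_, _, _) = (_, _, _)
  obtain ⟨a1, a2, a3⟩ := hA
  obtain ⟨b1, b2, b3⟩ := hB
  refine Prod.ext ?_ (Prod.ext ?_ ?_)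
  · simpa using a1.trans b1.symm
  · simpa using a2.trans b2.symm
  · show (bfsA_loop G (pvFuel G) _).loops
        = bfsB_pass2 G (bfsB_loop G (pvFuel G) _).tree (bfsB_loop G (pvFuel G) _).buses
            (PySem.Set.empty, [])
    rw [a3, b3, b1]
    rw [← hL]
-- ===== VERDICT (by name: the statement is the Claim_ definition above) =====
theorem bfs_edges_spec : Claim_equal_bfs_edges := by
  intro G start _ _
  unfold Spec_bfs_edges
  exact AB_eq G start
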